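-- pv_equiv track=rewrite | github.com/aka0kuro/hostberry | core/security_middleware.py | validate_input_sanitization
-- ===== SOURCE A (Python) =====
-- def validate_input_sanitization(input_data: str) -> bool:
--     """Validar sanitización de entrada"""
--     dangerous_patterns = [
--         "<script", "javascript:", "data:text/html", "vbscript:",
--         "onload=", "onerror=", "onclick=", "onmouseover="
--     ]
--
--     input_lower = input_data.lower()
--     for pattern in dangerous_patterns:
--         if pattern in input_lower:
--             return False
--
--     return True
-- ===== SOURCE B (Python) =====
-- def validate_input_sanitization(input_data: str) -> bool:
--     """Validar sanitización de entrada (single left-to-right scan over positions)"""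
--     dangerous_patterns = [
--         "<script", "javascript:", "data:text/html", "vbscript:",
--         "onload=", "onerror=", "onclick=", "onmouseover="
--     ]
--     s = input_data.lower()
--     return not any(
--         s.startswith(p, i) for i in range(len(s)) for p in dangerous_patterns
--     )
-- ===== Notes on version B (the rewrite author's own statement) =====
-- stated objective: alternative
-- what changed: Replaces the per-pattern substring-search loop by a single left-to-right scan over positions of the lowered string, testing at each position whether any dangerous pattern starts there.
import Mathlib
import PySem

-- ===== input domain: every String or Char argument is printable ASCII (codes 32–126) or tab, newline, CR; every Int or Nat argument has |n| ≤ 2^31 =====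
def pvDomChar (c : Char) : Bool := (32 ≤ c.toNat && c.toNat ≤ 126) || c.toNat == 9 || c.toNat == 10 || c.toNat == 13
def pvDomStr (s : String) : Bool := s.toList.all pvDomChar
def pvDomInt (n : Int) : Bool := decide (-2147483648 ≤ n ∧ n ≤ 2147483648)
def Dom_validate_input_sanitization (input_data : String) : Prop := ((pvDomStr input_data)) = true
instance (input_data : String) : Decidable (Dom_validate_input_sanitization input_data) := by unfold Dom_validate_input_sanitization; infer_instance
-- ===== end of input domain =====

-- B replaces the per-pattern substring loop by one position scan of the lowered string (alternative structure, same cost).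


-- ===== PORT A =====
def pvDangerousPatterns : List String :=
  ["<script", "javascript:", "data:text/html", "vbscript:",
   "onload=", "onerror=", "onclick=", "onmouseover="]

-- 'for pattern in dangerous_patterns: if pattern in input_lower: return False'
def pvLoopA (ps : List String) (input_lower : String) : Bool :=
  match ps with
  | [] => true
  | p :: rest => if PySem.Str.isIn p input_lower then false else pvLoopA rest input_lower

def validate_input_sanitization (input_data : String) : Bool :=
  pvLoopA pvDangerousPatterns (PySem.Str.lower input_data)

-- ===== PORT B =====
def pvDangerousPatternsChars : List (List Char) :=
  ["<script".toList, "javascript:".toList, "data:text/html".toList, "vbscript:".toList,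
   "onload=".toList, "onerror=".toList, "onclick=".toList, "onmouseover=".toList]

-- not any(s.startswith(p, i) for i in range(len(s)) for p in dangerous_patterns)
def validate_input_sanitization_alt (input_data : String) : Bool :=
  let s := PySem.Chars.lower input_data.toList
  !((List.range s.length).any (fun i =>
      pvDangerousPatternsChars.any (fun p => PySem.Chars.startswith (s.drop i) p)))

-- ===== PRECONDITION & SPEC =====
def Spec_validate_input_sanitization (input_data : String) (out : Bool) : Prop := out = validate_input_sanitization_alt input_data
instance (input_data : String) (out : Bool) : Decidable (Spec_validate_input_sanitization input_data out) := by unfold Spec_validate_input_sanitization; infer_instance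

-- ===== CLAIM (what is proved, stated in full; the proofs are below) =====
def Claim_equal_validate_input_sanitization : Prop := ∀ (input_data : String), Dom_validate_input_sanitization input_data → Spec_validate_input_sanitization input_data (validate_input_sanitization input_data)

-- ===== LEMMAS AND PROOFS =====

-- A's early-return loop is true iff no pattern is a substring.
theorem pvLoopA_eq_true_iff (ps : List String) (low : String) :
    pvLoopA ps low = true ↔ ∀ p ∈ ps, PySem.Str.isIn p low = false := by
  induction ps with
  | nil => simp [pvLoopA]
  | cons p rest ih =>
    by_cases h : PySem.Str.isIn p low = true
    · simp only [pvLoopA, if_pos h]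
      constructor
      · intro hf; cases hf
      · intro hall
        have := hall p (List.mem_cons_self)
        rw [this] at h; cases h
    · have h' : PySem.Str.isIn p low = false := by
        cases hb : PySem.Str.isIn p low
        · rfl
        · exact absurd hb h
      simp only [pvLoopA, if_neg h, ih]
      constructor
      · intro hall q hq
        rcases List.mem_cons.mp hq with rfl | hq'
        · exact h'
        · exact hall q hq'
      · intro hall q hq
        exact hall q (List.mem_cons_of_mem _ hq)

-- The two pattern lists coincide up to .toList.
theorem pvPatterns_map : pvDangerousPatternsChars = pvDangerousPatterns.map (fun q => q.toList) := by
  decide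

-- For a nonempty pattern, 'sub in s' matches B's bounded position scan.
theorem pvIsIn_iff_exists_lt (sub s : List Char) (hsub : sub ≠ []) :
    PySem.Chars.isIn sub s = true ↔ ∃ i < s.length, PySem.Chars.startswith (s.drop i) sub = true := by
  rw [← PySem.Chars.exists_prefix_drop_iff_isIn]
  constructor
  · rintro ⟨j, hj⟩
    have hjlt : j < s.length := by
      by_contra h
      rw [not_lt] at h
      rw [List.drop_eq_nil_of_le h] at hj
      exact hsub (List.prefix_nil.mp hj)
    exact ⟨j, hjlt, (PySem.Chars.startswith_iff _ _).mpr hj⟩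
  · rintro ⟨i, _, hi⟩
    exact ⟨i, (PySem.Chars.startswith_iff _ _).mp hi⟩

-- ===== VERDICT (by name: the statement is the Claim_ definition above) =====
theorem validate_input_sanitization_spec : Claim_equal_validate_input_sanitization := by
  intro input_data _
  show validate_input_sanitization input_data = validate_input_sanitization_alt input_data
  unfold validate_input_sanitization validate_input_sanitization_alt
  rw [Bool.eq_iff_iff]
  rw [pvLoopA_eq_true_iff]
  simp only [Bool.not_eq_eq_eq_not, Bool.not_true, List.any_eq_false, List.mem_range,
    Bool.not_eq_true]
  constructor
  · intro h i hi p hp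
    rw [← Bool.not_eq_true]
    intro hb
    -- relate to the corresponding String pattern
    rw [pvPatterns_map] at hp
    rcases List.mem_map.mp hp with ⟨q, hq, rfl⟩
    have hne : q.toList ≠ [] := by
      revert hq; simp only [pvDangerousPatterns, List.mem_cons, List.not_mem_nil, or_false]
      rintro (rfl | rfl | rfl | rfl | rfl | rfl | rfl | rfl) <;> decide
    have hin : PySem.Chars.isIn q.toList (PySem.Chars.lower input_data.toList) = true :=
      (pvIsIn_iff_exists_lt _ _ hne).mpr ⟨i, hi, hb⟩
    have := h q hq
    rw [PySem.Str.isIn_eq] at this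
    simp only [PySem.Str.toList_lower] at this
    rw [this] at hin
    exact Bool.false_ne_true hin
  · intro h q hq
    rw [PySem.Str.isIn_eq]
    simp only [PySem.Str.toList_lower]
    have hne : q.toList ≠ [] := by
      revert hq; simp only [pvDangerousPatterns, List.mem_cons, List.not_mem_nil, or_false]
      rintro (rfl | rfl | rfl | rfl | rfl | rfl | rfl | rfl) <;> decide
    rw [← Bool.not_eq_true, pvIsIn_iff_exists_lt _ _ hne]
    rintro ⟨i, hi, hsw⟩
    have hpmem : q.toList ∈ pvDangerousPatternsChars :=
      pvPatterns_map ▸ List.mem_map_of_mem hq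
    have := h i hi _ hpmem
    rw [this] at hsw
    exact Bool.false_ne_true hsw
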